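-- pv_equiv track=rewrite | github.com/MrHedmad/master-thesis | edmund/scripts/extractCHASMPlus.py | _rename_list
-- ===== SOURCE A (Python) =====
-- from typing import Any, Iterator, Optional, Union
--
-- def _rename_list(
--     list1: list[str], method: str, list2: Optional[list[str]] = None
-- ) -> list[str]:
--     """Renames multiple list items following different methods.
--
--     Method can be "consecutive" to rename identical consecutive items
--     with increasing number or "fuse" to fuse with the second list (list2)
--
--     Args:
--         list1: List of strings to be renamed
--         method: Type of renaming method. Can be "consecutive" to rename consecutive
--             identical items as progressive values ("tree", "tree" will become
--             "tree_0", "tree_1"); "fuse" to fuse with the values from list2.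
--             list2 must be of the same length as list1 while fusing.
--
--     Returns:
--         list of renamed values
--     """
--     last = None
--     new_list = []
--     count = 0
--     if method == "consecutive":
--         for item in list1:
--             if item == last:
--                 count += 1
--                 new_list.append(item + "_" + str(count))
--                 last = item
--             else:
--                 new_list.append(item + "_0")
--                 count = 0
--                 last = item
--
--     elif method == "fuse" and list2 is not None:
--         if len(list1) != len(list2):
--             raise ValueError(
--                 ("Length of lists not equal:" f" {len(list1)} vs {len(list2)}")
--             )
--         new_list = [str(i1) + "_" + str(i2) for i1, i2 in zip(list1, list2)]
--     else:
--         raise ValueError("Unrecognized method or list2 unspecified")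
--     return new_list
-- ===== SOURCE B (Python) =====
-- from typing import Optional
--
--
-- def _rename_list(
--     list1: list[str], method: str, list2: Optional[list[str]] = None
-- ) -> list[str]:
--     """Renames multiple list items following different methods (see A's docstring)."""
--     if method == "consecutive":
--         new_list = []
--         for i, item in enumerate(list1):
--             # stateless: find the start of the run containing position i by
--             # scanning backwards, and number the item by its offset in the run
--             j = i
--             while j > 0 and list1[j - 1] == item:
--                 j -= 1
--             new_list.append(item + "_" + str(i - j))
--         return new_list
--     elif method == "fuse" and list2 is not None:
--         if len(list1) != len(list2):
--             raise ValueError(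
--                 ("Length of lists not equal:" f" {len(list1)} vs {len(list2)}")
--             )
--         return [str(i1) + "_" + str(i2) for i1, i2 in zip(list1, list2)]
--     else:
--         raise ValueError("Unrecognized method or list2 unspecified")
-- ===== Notes on version B (the rewrite author's own statement) =====
-- stated objective: alternative
-- what changed: The consecutive branch drops A's carried last/count state machine: each item's number is computed independently and statelessly as its offset from the start of its run, found by a backward scan from its own position (nested scans, O(n^2) worst case, instead of one stateful pass); the fuse branch and the error paths are kept verbatim.
import Mathlib
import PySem

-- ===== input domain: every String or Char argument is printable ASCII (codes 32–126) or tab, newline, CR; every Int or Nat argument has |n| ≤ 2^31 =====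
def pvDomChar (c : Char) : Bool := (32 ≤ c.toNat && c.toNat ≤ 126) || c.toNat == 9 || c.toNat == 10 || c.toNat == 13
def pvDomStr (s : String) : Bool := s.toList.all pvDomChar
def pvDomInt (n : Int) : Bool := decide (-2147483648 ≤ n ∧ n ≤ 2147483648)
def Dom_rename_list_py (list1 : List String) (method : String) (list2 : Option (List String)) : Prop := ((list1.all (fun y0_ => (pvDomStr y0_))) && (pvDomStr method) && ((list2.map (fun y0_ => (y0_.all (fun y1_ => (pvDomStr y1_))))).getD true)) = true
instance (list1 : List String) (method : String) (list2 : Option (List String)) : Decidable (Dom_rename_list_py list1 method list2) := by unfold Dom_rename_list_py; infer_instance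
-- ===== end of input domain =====

-- B replaces A's carried last/count state machine in the "consecutive" branch by a stateless
-- per-index backward scan (each item numbered by its offset from its run start); fuse branch and
-- error paths unchanged. Objective: alternative (O(n^2) worst case vs A's O(n)).


-- ===== PORT A =====
-- A's "consecutive" loop: state (last, count), appending item_"0" on change, item_"count" on repeat.
def pvLoopA : List String → Option String → Int → List String
  | [], _, _ => []
  | item :: rest, last, count =>
    if some item = last then
      (item ++ "_" ++ PySem.Int.toStr (count + 1)) :: pvLoopA rest (some item) (count + 1)
    else
      (item ++ "_0") :: pvLoopA rest (some item) 0

def rename_list_py (list1 : List String) (method : String) (list2 : Option (List String)) : List String :=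
  if method = "consecutive" then
    pvLoopA list1 none 0
  else if method = "fuse" ∧ list2.isSome then
    match list2 with
    | some l2 => (list1.zip l2).map (fun p => p.1 ++ "_" ++ p.2)
    | none => []
  else
    []  -- Python raises ValueError here; excluded by Pre_

-- ===== PORT B =====
-- Source B's backward while loop 'j = i; while j > 0 and list1[j-1] == item: j -= 1', returning final j.
-- All accesses list1[j-1] are in range (0 ≤ j-1 < i < len), so getD is exact here.
def pvRunStart (l : List String) (x : String) : Nat → Nat
  | 0 => 0
  | j + 1 => if l.getD j "" = x then pvRunStart l x j else j + 1

def rename_list_py_alt (list1 : List String) (method : String) (list2 : Option (List String)) : List String :=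
  if method = "consecutive" then
    (PySem.List.enumerate list1 0).map
      (fun p => p.2 ++ "_" ++ PySem.Int.toStr (p.1 - (pvRunStart list1 p.2 p.1.toNat : Int)))
  else if method = "fuse" ∧ list2.isSome then
    match list2 with
    | some l2 => (list1.zip l2).map (fun p => p.1 ++ "_" ++ p.2)
    | none => []
  else
    []  -- Python raises ValueError here; excluded by Pre_

-- ===== PRECONDITION & SPEC =====
-- Pre_ excludes exactly the inputs where A raises ValueError (unknown method, fuse without
-- list2, or fuse with unequal lengths); B raises the same errors there.
def Pre_rename_list_py (list1 : List String) (method : String) (list2 : Option (List String)) : Prop :=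
  method = "consecutive" ∨
    (method = "fuse" ∧ ∃ l2, list2 = some l2 ∧ list1.length = l2.length)
instance (list1 : List String) (method : String) (list2 : Option (List String)) : Decidable (Pre_rename_list_py list1 method list2) := by unfold Pre_rename_list_py; infer_instance

def pvWitness_rename_list_py : List String × String × Option (List String) :=
  (["tree", "tree", "rock"], "consecutive", none)

def Spec_rename_list_py (list1 : List String) (method : String) (list2 : Option (List String)) (out : List String) : Prop := out = rename_list_py_alt list1 method list2
instance (list1 : List String) (method : String) (list2 : Option (List String)) (out : List String) : Decidable (Spec_rename_list_py list1 method list2 out) := by unfold Spec_rename_list_py; infer_instance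

-- ===== CLAIM (what is proved, stated in full; the proofs are below) =====
def Claim_equal_rename_list_py : Prop := ∀ (list1 : List String) (method : String) (list2 : Option (List String)), Dom_rename_list_py list1 method list2 → Pre_rename_list_py list1 method list2 → Spec_rename_list_py list1 method list2 (rename_list_py list1 method list2)

-- ===== LEMMAS AND PROOFS =====

-- A's loop state after processing the first k items: the previous item and its run index.
def pvLast (l : List String) : Nat → Option String
  | 0 => none
  | j + 1 => some (l.getD j "")

def pvCnt (l : List String) : Nat → Int
  | 0 => 0
  | j + 1 => (j : Int) - (pvRunStart l (l.getD j "") j : Int)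

theorem pv_underscore (s : String) : s ++ "_0" = s ++ "_" ++ PySem.Int.toStr 0 := by
  have h : ("_0" : String) = "_" ++ PySem.Int.toStr 0 := by decide
  rw [h, ← String.append_assoc]

theorem pv_inv (l : List String) : ∀ (s : List String) (k : Nat), l.drop k = s →
    pvLoopA s (pvLast l k) (pvCnt l k) =
      (PySem.List.enumerate s (k : Int)).map
        (fun p => p.2 ++ "_" ++ PySem.Int.toStr (p.1 - (pvRunStart l p.2 p.1.toNat : Int))) := by
  intro s
  induction s with
  | nil => intro k _; simp [pvLoopA, PySem.List.enumerate_nil]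
  | cons x rest ih =>
    intro k hk
    have h0 : l[k]? = some x := by
      have := congrArg (fun t => t[0]?) hk
      simpa using this
    have hx : l.getD k "" = x := by simp [List.getD_eq_getElem?_getD, h0]
    have hrest : l.drop (k + 1) = rest := by
      have h1 : (l.drop k).drop 1 = rest := by rw [hk]; rfl
      rw [List.drop_drop] at h1
      exact h1
    have htail := ih (k + 1) hrest
    rw [PySem.List.enumerate_cons, List.map_cons]
    cases k with
    | zero =>
      rw [pvLoopA, if_neg (by simp [pvLast] : ¬ some x = pvLast l 0)]
      congr 1
      · rw [pv_underscore x]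
        congr 2
      · rw [show (((0 : Nat) : Int) + 1) = ((0 + 1 : Nat) : Int) by norm_num, ← htail]
        simp only [pvLast, pvCnt, hx, pvRunStart, Nat.cast_zero, Int.sub_zero]
    | succ j =>
      simp only [pvLast, pvCnt]
      have htnn : ((((j + 1 : Nat)) : Int)).toNat = j + 1 := Int.toNat_natCast _
      by_cases hxy : x = l.getD j ""
      · -- repeated item: count increments
        have hrs : pvRunStart l x (j + 1) = pvRunStart l x j := by
          rw [pvRunStart, if_pos hxy.symm]
        rw [pvLoopA, if_pos (by rw [hxy])]
        congr 1
        · rw [← hxy]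
          congr 2
          rw [htnn, hrs]
          omega
        · rw [show (((j + 1 : Nat) : Int) + 1) = ((j + 1 + 1 : Nat) : Int) by push_cast; ring,
            ← htail]
          simp only [pvLast, pvCnt, hx, ← hxy, hrs]
          congr 1
          omega
      · -- run break: count resets to 0
        have hrs : pvRunStart l x (j + 1) = j + 1 := by
          rw [pvRunStart, if_neg (fun h => hxy (Eq.symm h))]
        rw [pvLoopA, if_neg (by simpa using fun h => hxy h)]
        congr 1
        · rw [pv_underscore x]
          congr 2
          rw [htnn, hrs]
          omega
        · rw [show (((j + 1 : Nat) : Int) + 1) = ((j + 1 + 1 : Nat) : Int) by push_cast; ring,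
            ← htail]
          simp only [pvLast, pvCnt, hx, hrs]
          congr 1
          omega

theorem pv_key (l : List String) : pvLoopA l none 0 =
    (PySem.List.enumerate l 0).map
      (fun p => p.2 ++ "_" ++ PySem.Int.toStr (p.1 - (pvRunStart l p.2 p.1.toNat : Int))) := by
  have h := pv_inv l l 0 rfl
  simpa [pvLast, pvCnt] using h

-- ===== VERDICT (by name: the statement is the Claim_ definition above) =====
theorem rename_list_py_spec : Claim_equal_rename_list_py := by
  intro list1 method list2 _ _
  unfold Spec_rename_list_py rename_list_py rename_list_py_alt
  split
  · exact pv_key list1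
  · rfl
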